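-- pv_equiv track=rewrite | github.com/karpathy/nanoGPT | test_kronzo_simple.py | choose_kron_dims_power2
-- ===== SOURCE A (Python) =====
-- def choose_kron_dims_power2(d_out, d_in):
--     def largest_power2_divisor(n):
--         """Find the largest power of 2 that divides n"""
--         power = 1
--         while power * 2 <= n and n % (power * 2) == 0:
--             power *= 2
--         return power
--
--     m1 = largest_power2_divisor(d_out)
--     n1 = d_out // m1
--
--     m2 = largest_power2_divisor(d_in)
--     n2 = d_in // m2
--
--     return (m1, n1, m2, n2)
-- ===== SOURCE B (Python) =====
-- def choose_kron_dims_power2(d_out, d_in):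
--     def split(d):
--         # lowest set bit of a positive int is the largest power-of-2 divisor
--         m = d & -d if d > 0 else 1
--         return m, d // m
--     m1, n1 = split(d_out)
--     m2, n2 = split(d_in)
--     return (m1, n1, m2, n2)
-- ===== Notes on version B (the rewrite author's own statement) =====
-- stated objective: idiomatic
-- what changed: Replaced the power-doubling trial-division while-loop with the closed-form lowest-set-bit trick d & -d (guarded to 1 for non-positive d, where no power of 2 search applies).
import Mathlib
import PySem

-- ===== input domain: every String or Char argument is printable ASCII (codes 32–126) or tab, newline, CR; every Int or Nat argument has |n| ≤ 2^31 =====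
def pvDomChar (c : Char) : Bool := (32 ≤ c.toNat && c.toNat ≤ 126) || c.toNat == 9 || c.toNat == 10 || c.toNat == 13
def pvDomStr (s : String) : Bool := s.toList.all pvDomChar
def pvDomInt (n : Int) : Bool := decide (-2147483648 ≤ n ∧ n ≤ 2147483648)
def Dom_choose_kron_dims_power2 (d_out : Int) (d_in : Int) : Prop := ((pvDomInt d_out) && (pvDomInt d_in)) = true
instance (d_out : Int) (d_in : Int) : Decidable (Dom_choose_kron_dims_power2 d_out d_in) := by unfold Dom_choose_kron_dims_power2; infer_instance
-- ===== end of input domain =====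

-- B replaces A's power-doubling trial-division loop with the closed-form lowest-set-bit trick d & -d (idiomatic; return-value equivalence).

-- ===== PORT A =====
-- inner while-loop of largest_power2_divisor: power doubles while power*2 <= n and n % (power*2) == 0
def lp2Loop (n : Int) (power : Int) (hp : 0 < power) : Int :=
  if power * 2 ≤ n ∧ PySem.Int.mod n (power * 2) = 0 then
    lp2Loop n (power * 2) (by omega)
  else
    power
termination_by (n - power).toNat
decreasing_by omega

def largest_power2_divisor (n : Int) : Int := lp2Loop n 1 (by omega)

def choose_kron_dims_power2 (d_out : Int) (d_in : Int) : Int × Int × Int × Int :=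
  let m1 := largest_power2_divisor d_out
  let n1 := PySem.Int.floordiv d_out m1
  let m2 := largest_power2_divisor d_in
  let n2 := PySem.Int.floordiv d_in m2
  (m1, n1, m2, n2)

-- ===== PORT B =====
-- Source B's split(d): m = d & -d if d > 0 else 1; return m, d // m
def splitB (d : Int) : Int × Int :=
  let m := if 0 < d then PySem.Int.band d (-d) else 1
  (m, PySem.Int.floordiv d m)

def choose_kron_dims_power2_alt (d_out : Int) (d_in : Int) : Int × Int × Int × Int :=
  let p1 := splitB d_out
  let p2 := splitB d_in
  (p1.1, p1.2, p2.1, p2.2)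

-- ===== PRECONDITION & SPEC =====
def Spec_choose_kron_dims_power2 (d_out : Int) (d_in : Int) (out : Int × Int × Int × Int) : Prop := out = choose_kron_dims_power2_alt d_out d_in
instance (d_out : Int) (d_in : Int) (out : Int × Int × Int × Int) : Decidable (Spec_choose_kron_dims_power2 d_out d_in out) := by unfold Spec_choose_kron_dims_power2; infer_instance

-- ===== CLAIM (what is proved, stated in full; the proofs are below) =====
def Claim_equal_choose_kron_dims_power2 : Prop := ∀ (d_out : Int) (d_in : Int), Dom_choose_kron_dims_power2 d_out d_in → Spec_choose_kron_dims_power2 d_out d_in (choose_kron_dims_power2 d_out d_in)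

-- ===== LEMMAS AND PROOFS =====

-- reference lowest-set-bit function used only by the proofs
def lowb (n : Nat) : Nat :=
  if h : n = 0 ∨ n % 2 = 1 then 1 else 2 * lowb (n / 2)
termination_by n
decreasing_by omega

theorem and_pred_of_odd (m : Nat) : (2 * m + 1) &&& (2 * m) = 2 * m := by
  apply Nat.eq_of_testBit_eq
  intro i
  cases i with
  | zero => simp
  | succ j =>
    have h1 : (2 * m + 1) / 2 = m := by omega
    have h2 : (2 * m) / 2 = m := by omega
    simp only [Nat.testBit_succ, Nat.and_div_two, h1, h2, Nat.testBit_and, Bool.and_self]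

theorem and_pred_of_even (m : Nat) (hm : 0 < m) :
    (2 * m) &&& (2 * m - 1) = 2 * (m &&& (m - 1)) := by
  apply Nat.eq_of_testBit_eq
  intro i
  cases i with
  | zero => simp
  | succ j =>
    have h1 : (2 * m) / 2 = m := by omega
    have h2 : (2 * m - 1) / 2 = m - 1 := by omega
    have h3 : (2 * (m &&& (m - 1))) / 2 = m &&& (m - 1) := by omega
    simp only [Nat.testBit_succ, Nat.and_div_two, h1, h2, h3]

-- n minus "n with its lowest set bit cleared" is the lowest set bit
theorem sub_and_pred_eq_lowb (n : Nat) (hn : 0 < n) : n - (n &&& (n - 1)) = lowb n := by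
  induction n using Nat.strong_induction_on with
  | _ n ih =>
    rcases Nat.even_or_odd n with ⟨m, hm⟩ | ⟨m, hm⟩
    · have hm' : n = 2 * m := by omega
      have hmpos : 0 < m := by omega
      subst hm'
      rw [and_pred_of_even m hmpos, lowb]
      rw [dif_neg (by omega : ¬ (2 * m = 0 ∨ 2 * m % 2 = 1))]
      have h2 : 2 * m / 2 = m := by omega
      rw [h2, ← ih m (by omega) hmpos]
      have := Nat.and_le_left (n := m) (m := m - 1)
      omega
    · subst hm
      rw [lowb, dif_pos (by omega : (2 * m + 1 = 0 ∨ (2 * m + 1) % 2 = 1))]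
      rw [show 2 * m + 1 - 1 = 2 * m from by omega, and_pred_of_odd]
      omega

-- A's loop, started at any positive divisor p of n, multiplies p by the lowest set bit of n/p
theorem lp2Loop_spec (n p : Int) (hp : 0 < p) (hn : 0 < n) (hd : p ∣ n) :
    lp2Loop n p hp = p * (lowb ((n / p).toNat) : Int) := by
  obtain ⟨q, hq⟩ := hd
  have hp' : p ≠ 0 := by omega
  have hq0 : 0 < q := by nlinarith [hq]
  have hdiv : n / p = q := by rw [hq]; exact Int.mul_ediv_cancel_left q hp'
  rw [lp2Loop]
  by_cases hc : p * 2 ≤ n ∧ PySem.Int.mod n (p * 2) = 0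
  · rw [if_pos hc]
    have hdvd : (p * 2) ∣ n := (PySem.Int.mod_eq_zero_iff_dvd n (p * 2)).mp hc.2
    obtain ⟨q2, hq2⟩ := hdvd
    have hq2pos : 0 < q2 := by nlinarith [hq2]
    have hqq : q = 2 * q2 := by nlinarith [hq, hq2]
    have ih := lp2Loop_spec n (p * 2) (by omega) hn ⟨q2, hq2⟩
    rw [ih]
    have hdiv2 : n / (p * 2) = q2 := by rw [hq2]; exact Int.mul_ediv_cancel_left q2 (by omega)
    rw [hdiv, hdiv2, hqq]
    rw [show (2 * q2).toNat = 2 * q2.toNat from by omega]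
    rw [show lowb (2 * q2.toNat) = 2 * lowb (2 * q2.toNat / 2) from by
      rw [lowb]; rw [dif_neg (by omega)]]
    rw [show 2 * q2.toNat / 2 = q2.toNat from by omega]
    push_cast
    ring
  · rw [if_neg hc, hdiv]
    have hq1 : lowb q.toNat = 1 := by
      rcases Nat.even_or_odd q.toNat with ⟨r, hr⟩ | ⟨r, hr⟩
      · have hrq : q = 2 * (r : Int) := by omega
        have hr0 : 0 < r := by omega
        exfalso
        apply hc
        refine ⟨by nlinarith [hq, hrq], ?_⟩
        rw [PySem.Int.mod_eq_zero_iff_dvd]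
        exact ⟨r, by rw [hq, hrq]; ring⟩
      · rw [lowb]; rw [dif_pos (by omega)]
    rw [hq1]; ring
termination_by (n - p).toNat
decreasing_by omega

theorem helper_eq (d : Int) : largest_power2_divisor d = (splitB d).1 := by
  unfold largest_power2_divisor splitB
  by_cases hd : 0 < d
  · rw [if_pos hd]
    rw [lp2Loop_spec d 1 (by omega) hd ⟨d, by ring⟩]
    rw [show d / 1 = d from Int.ediv_one d]
    rw [show PySem.Int.band d (-d)
          = ((d.toNat - (d.toNat &&& (d.toNat - 1)) : Nat) : Int) from by
      simp only [PySem.Int.band]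
      rw [if_pos (by omega : (0:Int) ≤ d), if_neg (by omega : ¬ (0:Int) ≤ -d)]
      rw [show (- -d - 1).toNat = d.toNat - 1 from by omega]]
    rw [sub_and_pred_eq_lowb d.toNat (by omega)]
    ring
  · rw [if_neg hd, lp2Loop, if_neg (by omega : ¬ (1 * 2 ≤ d ∧ PySem.Int.mod d (1 * 2) = 0))]

-- ===== VERDICT (by name: the statement is the Claim_ definition above) =====
theorem choose_kron_dims_power2_spec : Claim_equal_choose_kron_dims_power2 := by
  intro d_out d_in _
  unfold Spec_choose_kron_dims_power2 choose_kron_dims_power2 choose_kron_dims_power2_alt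
  rw [helper_eq d_out, helper_eq d_in]
  simp [splitB]
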